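-- pv_equiv track=rewrite | github.com/happy-lu/spark | utils/main.py | detect_suitable_line
-- ===== SOURCE A (Python) =====
-- def detect_suitable_line(lines, check_point):
--     start_point = [-1,-1]
--     start_point[0] = check_point[1]
--     start_point[1] = check_point[0]
--     suit_h_line = []
--     suit_v_line = []
--     for detect_line in lines:
--         x1 = detect_line[0]
--         x2 = detect_line[2]
--         y1 = detect_line[1]
--         y2 = detect_line[3]
--         if(x1 == x2):
--             if (len(suit_h_line) == 0):
--                 suit_h_line = detect_line
--             else:
--                 if (abs(suit_h_line[0] - start_point[0]) > abs(detect_line[0] - start_point[0])):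
--                     suit_h_line = detect_line
--         if(y1 == y2):
--             if (len(suit_v_line) == 0):
--                 suit_v_line = detect_line
--             else:
--                 if (abs(suit_v_line[1] - start_point[1]) > abs(detect_line[1] - start_point[1])):
--                     suit_v_line = detect_line
--     return suit_h_line,suit_v_line
-- ===== SOURCE B (Python) =====
-- def detect_suitable_line(lines, check_point):
--     start_point = [check_point[1], check_point[0]]
--     verticals = sorted((l for l in lines if l[0] == l[2]),
--                        key=lambda l: abs(l[0] - start_point[0]))
--     horizontals = sorted((l for l in lines if l[1] == l[3]),
--                          key=lambda l: abs(l[1] - start_point[1]))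
--     suit_h_line = verticals[0] if verticals else []
--     suit_v_line = horizontals[0] if horizontals else []
--     return suit_h_line, suit_v_line
-- ===== Notes on version B (the rewrite author's own statement) =====
-- stated objective: alternative
-- what changed: A's single interleaved loop threading two sentinel-initialised running-minimum accumulators is replaced by sort-then-pick: each direction's candidates are filtered out and stably sorted by absolute distance to the reference coordinate, and the first element of the sorted list (or [] if empty) is returned; stability of Python's sort makes the first-tie winner identical to A's strict-improvement scan.
import Mathlib
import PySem

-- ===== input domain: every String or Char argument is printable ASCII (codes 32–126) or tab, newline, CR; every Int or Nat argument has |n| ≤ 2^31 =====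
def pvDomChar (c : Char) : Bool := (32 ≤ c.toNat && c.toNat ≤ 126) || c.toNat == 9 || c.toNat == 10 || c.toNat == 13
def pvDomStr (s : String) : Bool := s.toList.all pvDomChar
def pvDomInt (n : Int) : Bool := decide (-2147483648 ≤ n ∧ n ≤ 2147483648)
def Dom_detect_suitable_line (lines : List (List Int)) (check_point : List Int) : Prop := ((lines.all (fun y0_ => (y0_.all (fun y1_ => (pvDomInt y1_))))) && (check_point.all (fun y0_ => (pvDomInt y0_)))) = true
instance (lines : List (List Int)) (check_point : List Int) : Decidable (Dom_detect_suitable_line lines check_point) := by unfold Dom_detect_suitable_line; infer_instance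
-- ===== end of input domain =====

-- B replaces A's interleaved running-minimum loop by sort-then-pick: filter each direction's candidates, stably sort by absolute distance, take the head (objective: alternative).


-- ===== PORT A =====
def detect_suitable_line (lines : List (List Int)) (check_point : List Int) : List Int × List Int :=
  -- start_point = [check_point[1], check_point[0]]; index errors are excluded by Pre_, so pyGetD … 0 is exact there
  let s0 := PySem.List.pyGetD check_point 1 0
  let s1 := PySem.List.pyGetD check_point 0 0
  lines.foldl (fun st detect_line =>
    let x1 := PySem.List.pyGetD detect_line 0 0
    let x2 := PySem.List.pyGetD detect_line 2 0
    let y1 := PySem.List.pyGetD detect_line 1 0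
    let y2 := PySem.List.pyGetD detect_line 3 0
    let suit_h_line :=
      if x1 == x2 then
        (if st.1.length == 0 then detect_line
         else if |PySem.List.pyGetD st.1 0 0 - s0| > |PySem.List.pyGetD detect_line 0 0 - s0| then detect_line
         else st.1)
      else st.1
    let suit_v_line :=
      if y1 == y2 then
        (if st.2.length == 0 then detect_line
         else if |PySem.List.pyGetD st.2 1 0 - s1| > |PySem.List.pyGetD detect_line 1 0 - s1| then detect_line
         else st.2)
      else st.2
    (suit_h_line, suit_v_line)) ([], [])

-- ===== PORT B =====
def detect_suitable_line_alt (lines : List (List Int)) (check_point : List Int) : List Int × List Int :=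
  let s0 := PySem.List.pyGetD check_point 1 0
  let s1 := PySem.List.pyGetD check_point 0 0
  let verticals := PySem.List.sorted
    (lines.filter (fun l => PySem.List.pyGetD l 0 0 == PySem.List.pyGetD l 2 0))
    (fun l => |PySem.List.pyGetD l 0 0 - s0|)
  let horizontals := PySem.List.sorted
    (lines.filter (fun l => PySem.List.pyGetD l 1 0 == PySem.List.pyGetD l 3 0))
    (fun l => |PySem.List.pyGetD l 1 0 - s1|)
  let suit_h_line := match verticals with | [] => ([] : List Int) | m :: _ => m
  let suit_v_line := match horizontals with | [] => ([] : List Int) | m :: _ => m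
  (suit_h_line, suit_v_line)

-- ===== PRECONDITION & SPEC =====
-- Pre_ = exactly the inputs where Python A raises no IndexError: check_point has the two
-- coordinates it reads and every line has the four coordinates A reads from it.
def Pre_detect_suitable_line (lines : List (List Int)) (check_point : List Int) : Prop :=
  2 ≤ check_point.length ∧ ∀ l ∈ lines, 4 ≤ l.length
instance (lines : List (List Int)) (check_point : List Int) : Decidable (Pre_detect_suitable_line lines check_point) := by unfold Pre_detect_suitable_line; infer_instance
def pvWitness_detect_suitable_line : List (List Int) × List Int := ([[0, 0, 0, 5], [1, 2, 7, 2]], [3, 4])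

def Spec_detect_suitable_line (lines : List (List Int)) (check_point : List Int) (out : List Int × List Int) : Prop := out = detect_suitable_line_alt lines check_point
instance (lines : List (List Int)) (check_point : List Int) (out : List Int × List Int) : Decidable (Spec_detect_suitable_line lines check_point out) := by unfold Spec_detect_suitable_line; infer_instance

-- ===== CLAIM (what is proved, stated in full; the proofs are below) =====
def Claim_equal_detect_suitable_line : Prop := ∀ (lines : List (List Int)) (check_point : List Int), Dom_detect_suitable_line lines check_point → Pre_detect_suitable_line lines check_point → Spec_detect_suitable_line lines check_point (detect_suitable_line lines check_point)

-- ===== LEMMAS AND PROOFS =====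

-- A's strict-improvement scan (with [] as the "no candidate yet" sentinel) over one direction
-- equals a first-minimum option fold over the cond-filtered list, for any condition and key.
theorem strictmin_fold (cond : List Int → Bool) (key : List Int → Int) :
    ∀ (lines : List (List Int)) (acc : Option (List Int)),
      (∀ l ∈ lines, l ≠ []) → (∀ m, acc = some m → m ≠ []) →
      lines.foldl (fun s l =>
          if cond l then
            (if s.length == 0 then l
             else if key s > key l then l else s)
          else s) (acc.getD [])
        = ((lines.filter cond).foldl (fun o l =>
            match o with
            | none => some l
            | some m => if key l < key m then some l else some m) acc).getD [] := by
  intro lines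
  induction lines with
  | nil => intro acc _ _; rfl
  | cons l rest ih =>
    intro acc hne hacc
    have hl : l ≠ [] := hne l (by simp)
    have hne' : ∀ x ∈ rest, x ≠ [] := fun x hx => hne x (by simp [hx])
    by_cases hc : cond l = true
    · cases acc with
      | none =>
        have := ih (some l) hne' (fun x hx => by cases hx; exact hl)
        simpa [List.filter_cons, hc] using this
      | some m =>
        have hm : m ≠ [] := hacc m rfl
        by_cases hk : key l < key m
        · have := ih (some l) hne' (fun x hx => by cases hx; exact hl)
          simpa [List.filter_cons, hc, hm, hk] using this
        · have := ih (some m) hne' hacc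
          simpa [List.filter_cons, hc, hm, hk] using this
    · have := ih acc hne' hacc
      simpa [List.filter_cons, hc] using this

-- The head of the left-fold-of-stable-insertions (= PySem.List.sorted) is computed by the
-- same first-minimum option fold: an insertion changes the head iff the new key is strictly smaller.
theorem head_foldl_insertBy {α : Type} (key : α → Int) :
    ∀ (t : List α) (acc : List α),
      (t.foldl (fun a x => PySem.List.insertBy (fun a b => decide (key a < key b)) x a) acc).head?
        = t.foldl (fun o l =>
            match o with
            | none => some l
            | some m => if key l < key m then some l else some m) acc.head? := by
  intro t
  induction t with
  | nil => intro acc; rfl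
  | cons x rest ih =>
    intro acc
    rw [List.foldl_cons, List.foldl_cons, ih]
    congr 1
    cases acc with
    | nil => rfl
    | cons m r =>
      simp only [PySem.List.insertBy]
      by_cases h : key x < key m <;> simp [h]

-- head-or-[] of sorted(filtered) equals the first-minimum option fold over the filtered list.
theorem sorted_head_min (key : List Int → Int) (ys : List (List Int)) :
    (match PySem.List.sorted ys key with | [] => ([] : List Int) | m :: _ => m)
      = (ys.foldl (fun o l =>
          match o with
          | none => some l
          | some m => if key l < key m then some l else some m) none).getD [] := by
  have h : (PySem.List.sorted ys key).head?
      = ys.foldl (fun o l =>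
          match o with
          | none => some l
          | some m => if key l < key m then some l else some m) none := by
    rw [PySem.List.sorted_eq_foldl_insertBy, head_foldl_insertBy]
    congr 1
    funext o l
    cases o <;> rfl
  cases hs : PySem.List.sorted ys key with
  | nil => rw [hs] at h; exact (h ▸ rfl)
  | cons m t => rw [hs] at h; exact (h ▸ rfl)

-- ===== VERDICT (by name: the statement is the Claim_ definition above) =====
theorem detect_suitable_line_spec : Claim_equal_detect_suitable_line := by
  intro lines check_point _ hpre
  unfold Spec_detect_suitable_line detect_suitable_line detect_suitable_line_alt
  have hne : ∀ l ∈ lines, l ≠ [] := fun l hl => by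
    have := hpre.2 l hl
    intro h; subst h; simp at this
  have hh := strictmin_fold
      (fun l => PySem.List.pyGetD l 0 0 == PySem.List.pyGetD l 2 0)
      (fun l => |PySem.List.pyGetD l 0 0 - PySem.List.pyGetD check_point 1 0|)
      lines none hne (fun m hm => by cases hm)
  have hv := strictmin_fold
      (fun l => PySem.List.pyGetD l 1 0 == PySem.List.pyGetD l 3 0)
      (fun l => |PySem.List.pyGetD l 1 0 - PySem.List.pyGetD check_point 0 0|)
      lines none hne (fun m hm => by cases hm)
  refine ((PySem.List.foldl_prod_mk
      (fun (s : List Int) (l : List Int) =>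
        if PySem.List.pyGetD l 0 0 == PySem.List.pyGetD l 2 0 then
          (if s.length == 0 then l
           else if |PySem.List.pyGetD s 0 0 - PySem.List.pyGetD check_point 1 0| >
               |PySem.List.pyGetD l 0 0 - PySem.List.pyGetD check_point 1 0| then l
           else s)
        else s)
      (fun (s : List Int) (l : List Int) =>
        if PySem.List.pyGetD l 1 0 == PySem.List.pyGetD l 3 0 then
          (if s.length == 0 then l
           else if |PySem.List.pyGetD s 1 0 - PySem.List.pyGetD check_point 0 0| >
               |PySem.List.pyGetD l 1 0 - PySem.List.pyGetD check_point 0 0| then l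
           else s)
        else s)
      lines [] []).trans ?_)
  exact congrArg₂ Prod.mk
    (hh.trans (sorted_head_min _ _).symm)
    (hv.trans (sorted_head_min _ _).symm)
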